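-- pv_equiv track=rewrite | github.com/Oaklight/toolregistry-server | src/toolregistry_server/cli/openapi.py | _should_load_tool
-- ===== SOURCE A (Python) =====
-- def _ns_matches(tool_namespace: str, pattern: str) -> bool:
--     """Check if a tool namespace matches a config pattern.
--
--     Supports exact match and prefix match for hierarchical namespaces.
--     For example, pattern ``"web"`` matches ``"web/brave_search"``.
--
--     Args:
--         tool_namespace: The tool's namespace (e.g. ``"web/brave_search"``).
--         pattern: The config pattern (e.g. ``"web"`` or ``"web/brave_search"``).
--
--     Returns:
--         True if the namespace matches the pattern.
--     """
--     return tool_namespace == pattern or tool_namespace.startswith(pattern + "/")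
--
-- def _should_load_tool(
--     namespace: str | None,
--     mode: str,
--     disabled_namespaces: list[str],
--     enabled_namespaces: list[str],
-- ) -> bool:
--     """Determine if a tool should be loaded based on mode and namespace lists.
--
--     Args:
--         namespace: The tool's namespace, or None if not specified.
--         mode: Either "denylist" or "allowlist".
--         disabled_namespaces: List of namespaces to disable (denylist mode).
--         enabled_namespaces: List of namespaces to enable (allowlist mode).
--
--     Returns:
--         True if the tool should be loaded, False otherwise.
--     """
--     if namespace is None:
--         # Tools without namespace are always loaded
--         return True
--
--     if mode == "denylist":
--         # In denylist mode, load unless namespace is in disabled list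
--         for pattern in disabled_namespaces:
--             if _ns_matches(namespace, pattern):
--                 return False
--         return True
--     else:
--         # In allowlist mode, only load if namespace is in enabled list
--         return any(_ns_matches(namespace, pattern) for pattern in enabled_namespaces)
-- ===== SOURCE B (Python) =====
-- def _should_load_tool(namespace, mode, disabled_namespaces, enabled_namespaces):
--     if namespace is None:
--         return True
--     # set of all patterns that can match this namespace: itself and every
--     # prefix ending just before a '/'
--     ancestors = {namespace}
--     for i, ch in enumerate(namespace):
--         if ch == '/':
--             ancestors.add(namespace[:i])
--     if mode == "denylist":
--         return ancestors.isdisjoint(disabled_namespaces)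
--     return not ancestors.isdisjoint(enabled_namespaces)
-- ===== Notes on version B (the rewrite author's own statement) =====
-- stated objective: alternative
-- what changed: Instead of scanning the pattern list and testing each pattern with == / startswith, B makes one pass over the namespace to build the set of all patterns that could match it (the namespace and every prefix cut just before a '/') and then decides with a single hashed set-disjointness test against the config list.
import Mathlib
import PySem

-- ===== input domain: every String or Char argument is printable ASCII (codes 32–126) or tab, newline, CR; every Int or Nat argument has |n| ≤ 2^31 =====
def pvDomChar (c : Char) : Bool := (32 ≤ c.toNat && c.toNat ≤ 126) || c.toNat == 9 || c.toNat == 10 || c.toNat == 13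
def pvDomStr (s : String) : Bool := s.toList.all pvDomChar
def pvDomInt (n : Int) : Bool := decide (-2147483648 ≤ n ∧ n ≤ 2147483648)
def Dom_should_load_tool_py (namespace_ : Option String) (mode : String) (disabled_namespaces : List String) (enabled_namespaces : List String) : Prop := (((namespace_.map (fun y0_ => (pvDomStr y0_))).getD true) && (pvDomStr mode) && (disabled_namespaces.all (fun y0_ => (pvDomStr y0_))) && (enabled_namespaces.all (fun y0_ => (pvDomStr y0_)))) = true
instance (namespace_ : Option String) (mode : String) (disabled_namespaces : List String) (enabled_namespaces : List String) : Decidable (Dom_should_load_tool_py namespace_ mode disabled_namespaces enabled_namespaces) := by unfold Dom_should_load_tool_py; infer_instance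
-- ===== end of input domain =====

-- B replaces the per-pattern startswith scans by one pass over the namespace that
-- builds the set of all patterns able to match it, then a set-disjointness test
-- against the config list (objective: alternative/idiomatic; no speed claim).

-- ===== PORT A =====
-- _ns_matches: exact match or prefix-before-'/' match
def pvNsMatches (ns p : List Char) : Bool :=
  ns == p || PySem.Chars.startswith ns (p ++ ['/'])

-- the denylist for-loop with early return False
def pvDenyLoop (ns : List Char) : List String → Bool
  | [] => true
  | p :: rest => if pvNsMatches ns p.toList then false else pvDenyLoop ns rest

def should_load_tool_py (namespace_ : Option String) (mode : String) (disabled_namespaces : List String) (enabled_namespaces : List String) : Bool :=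
  match namespace_ with
  | none => true
  | some ns =>
    if mode == "denylist" then
      pvDenyLoop ns.toList disabled_namespaces
    else
      enabled_namespaces.any (fun p => pvNsMatches ns.toList p.toList)

-- ===== PORT B =====
-- {namespace} ∪ {namespace[:i] for i, ch in enumerate(namespace) if ch == '/'}
def pvAncestors (ns : List Char) : PySem.Set (List Char) :=
  (PySem.List.enumerate ns).foldl
    (fun s ic => if ic.2 == '/' then PySem.Set.add s (PySem.List.slice ns none (some ic.1)) else s)
    (PySem.Set.ofList [ns])

def should_load_tool_py_alt (namespace_ : Option String) (mode : String) (disabled_namespaces : List String) (enabled_namespaces : List String) : Bool :=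
  match namespace_ with
  | none => true
  | some ns =>
    let anc := pvAncestors ns.toList
    if mode == "denylist" then
      PySem.Set.isdisjoint anc (disabled_namespaces.map String.toList)
    else
      ! PySem.Set.isdisjoint anc (enabled_namespaces.map String.toList)

-- ===== PRECONDITION & SPEC =====
def Spec_should_load_tool_py (namespace_ : Option String) (mode : String) (disabled_namespaces : List String) (enabled_namespaces : List String) (out : Bool) : Prop := out = should_load_tool_py_alt namespace_ mode disabled_namespaces enabled_namespaces
instance (namespace_ : Option String) (mode : String) (disabled_namespaces : List String) (enabled_namespaces : List String) (out : Bool) : Decidable (Spec_should_load_tool_py namespace_ mode disabled_namespaces enabled_namespaces out) := by unfold Spec_should_load_tool_py; infer_instance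

-- ===== CLAIM (what is proved, stated in full; the proofs are below) =====
def Claim_equal_should_load_tool_py : Prop := ∀ (namespace_ : Option String) (mode : String) (disabled_namespaces : List String) (enabled_namespaces : List String), Dom_should_load_tool_py namespace_ mode disabled_namespaces enabled_namespaces → Spec_should_load_tool_py namespace_ mode disabled_namespaces enabled_namespaces (should_load_tool_py namespace_ mode disabled_namespaces enabled_namespaces)

-- ===== LEMMAS AND PROOFS =====

-- membership in a conditional-add fold over a Set
theorem pv_mem_foldl_addIf {α β : Type} [BEq α] [LawfulBEq α] (f : β → α) (c : β → Bool)
    (l : List β) (s : PySem.Set α) (x : α) :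
    (x ∈ l.foldl (fun s b => if c b then PySem.Set.add s (f b) else s) s) ↔
      x ∈ s ∨ ∃ b ∈ l, c b = true ∧ x = f b := by
  induction l generalizing s with
  | nil => simp
  | cons b l ih =>
    simp only [List.foldl_cons]
    by_cases h : c b = true
    · simp only [h, if_true, ih, PySem.Set.mem_add]
      constructor
      · rintro (⟨hs | he⟩ | hr)
        · exact Or.inl hs
        · exact Or.inr ⟨b, by simp, h, he⟩
        · rcases hr with ⟨b', hb', hc', he'⟩; exact Or.inr ⟨b', by simp [hb'], hc', he'⟩
      · rintro (hs | ⟨b', hb', hc', he'⟩)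
        · exact Or.inl (Or.inl hs)
        · rcases List.mem_cons.mp hb' with rfl | hb'
          · exact Or.inl (Or.inr he')
          · exact Or.inr ⟨b', hb', hc', he'⟩
    · simp only [h, ih]
      constructor
      · rintro (hs | ⟨b', hb', hc', he'⟩)
        · exact Or.inl hs
        · exact Or.inr ⟨b', by simp [hb'], hc', he'⟩
      · rintro (hs | ⟨b', hb', hc', he'⟩)
        · exact Or.inl hs
        · rcases List.mem_cons.mp hb' with rfl | hb'
          · exact absurd hc' h
          · exact Or.inr ⟨b', hb', hc', he'⟩

-- "x ++ ['/'] is a prefix of ns" ⟺ "x is ns cut just before some '/'"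
theorem pv_prefix_slash_iff (ns x : List Char) :
    (x ++ ['/']) <+: ns ↔ ∃ k, ∃ h : k < ns.length, ns[k] = '/' ∧ x = ns.take k := by
  constructor
  · rintro ⟨t, ht⟩
    subst ht
    refine ⟨x.length, by simp, ?_, ?_⟩
    · simp
    · rw [List.append_assoc]
      simp
  · rintro ⟨k, hk, hc, rfl⟩
    refine ⟨ns.drop (k + 1), ?_⟩
    have h1 : ns.take (k + 1) = ns.take k ++ ['/'] := by
      rw [List.take_add_one, List.getElem?_eq_getElem hk, hc]
      rfl
    calc ns.take k ++ ['/'] ++ ns.drop (k + 1)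
        = ns.take (k + 1) ++ ns.drop (k + 1) := by rw [h1]
      _ = ns := List.take_append_drop _ _

theorem pv_mem_ancestors (ns x : List Char) :
    x ∈ pvAncestors ns ↔ pvNsMatches ns x = true := by
  unfold pvAncestors pvNsMatches
  refine Iff.trans (pv_mem_foldl_addIf (f := fun ic : Int × Char => PySem.List.slice ns none (some ic.1))
        (c := fun ic : Int × Char => ic.2 == '/') (PySem.List.enumerate ns) (PySem.Set.ofList [ns]) x) ?_
  simp only [PySem.Set.mem_ofList, List.mem_singleton, Bool.or_eq_true, beq_iff_eq,
    PySem.Chars.startswith_iff]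
  constructor
  · rintro (rfl | ⟨ic, hic, hc, rfl⟩)
    · exact Or.inl rfl
    · rcases (PySem.List.mem_enumerate_iff ns 0 ic).mp hic with ⟨k, hk, rfl⟩
      refine Or.inr ((pv_prefix_slash_iff ns _).mpr ⟨k, hk, by simpa using hc, ?_⟩)
      rw [PySem.List.slice_to ns (by simp)]
      simp
  · rintro (rfl | hp)
    · exact Or.inl rfl
    · rcases (pv_prefix_slash_iff ns x).mp hp with ⟨k, hk, hc, rfl⟩
      refine Or.inr ⟨((0 : Int) + k, ns[k]), (PySem.List.mem_enumerate_iff ns 0 _).mpr ⟨k, hk, rfl⟩, by simpa using hc, ?_⟩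
      rw [PySem.List.slice_to ns (by simp)]
      simp

-- the denylist early-return loop is "no pattern matches"
theorem pv_denyLoop_eq (ns : List Char) (pats : List String) :
    pvDenyLoop ns pats = pats.all (fun p => ! pvNsMatches ns p.toList) := by
  induction pats with
  | nil => rfl
  | cons p rest ih =>
    simp only [pvDenyLoop, List.all_cons]
    by_cases h : pvNsMatches ns p.toList = true <;> simp [h, ih]

-- disjointness of the ancestor set from the pattern list ⟺ no pattern matches
theorem pv_isdisjoint_eq (ns : List Char) (pats : List String) :
    PySem.Set.isdisjoint (pvAncestors ns) (pats.map String.toList)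
      = pats.all (fun p => ! pvNsMatches ns p.toList) := by
  rw [Bool.eq_iff_iff]
  constructor
  · intro h
    simp only [List.all_eq_true]
    intro p hp
    by_contra hb
    have hm : pvNsMatches ns p.toList = true := by simpa using hb
    simp [PySem.Set.isdisjoint] at h
    exact h p.toList ((pv_mem_ancestors ns p.toList).mpr hm) p hp rfl
  · intro h
    simp only [PySem.Set.isdisjoint]
    simp only [Bool.not_eq_true', List.any_eq_false, PySem.Set.contains, List.contains_eq_mem,
      List.mem_map]
    intro x hx hd
    obtain ⟨p, hp, he⟩ := of_decide_eq_true hd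
    subst he
    exact absurd ((pv_mem_ancestors ns p.toList).mp hx)
      (by simpa using List.all_eq_true.mp h p hp)

-- ===== VERDICT (by name: the statement is the Claim_ definition above) =====
theorem should_load_tool_py_spec : Claim_equal_should_load_tool_py := by
  intro namespace_ mode disabled enabled _
  unfold Spec_should_load_tool_py should_load_tool_py should_load_tool_py_alt
  cases namespace_ with
  | none => rfl
  | some ns =>
    simp only
    by_cases h : (mode == "denylist") = true
    · simp only [h, if_true, pv_denyLoop_eq, pv_isdisjoint_eq]
    · simp only [h, pv_isdisjoint_eq]
      rw [Bool.eq_iff_iff]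
      simp [List.any_eq_true]
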